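-- pv_equiv track=rewrite | github.com/togodot/Algorithm-Test | Python(programmers)/[Lev.1] 숫자 짝꿍.py | solution
-- ===== SOURCE A (Python) =====
-- from collections import Counter
--
-- def solution(X, Y):
--     x_dic = Counter(list(X))
--     y_dic = Counter(list(Y))
--     res = ''
--
--     for k in set(X) & set(Y):
--         res += k * min(x_dic[k],y_dic[k])
--
--     ans = ''.join(sorted(res, reverse=True))
--
--     if set(ans) == {'0'}:
--         return '0'
--     elif len(ans) > 0:
--         return ans
--     else:
--         return '-1'
-- ===== SOURCE B (Python) =====
-- from collections import Counter
--
-- def solution(X, Y):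
--     # counting sweep over char codes 126..9 (descending): no comparison sort
--     cx = Counter(X)
--     cy = Counter(Y)
--     parts = []
--     for code in range(126, 8, -1):
--         c = chr(code)
--         parts.append(c * min(cx[c], cy[c]))
--     ans = ''.join(parts)
--     if not ans:
--         return '-1'
--     if ans.count('0') == len(ans):
--         return '0'
--     return ans
-- ===== Notes on version B (the rewrite author's own statement) =====
-- stated objective: faster
-- what changed: B replaces A's set-intersection loop plus reverse comparison sort by a single counting sweep over the fixed char-code range 126..9, emitting each common character min-count times in descending order, so no sort is performed.
import Mathlib
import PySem

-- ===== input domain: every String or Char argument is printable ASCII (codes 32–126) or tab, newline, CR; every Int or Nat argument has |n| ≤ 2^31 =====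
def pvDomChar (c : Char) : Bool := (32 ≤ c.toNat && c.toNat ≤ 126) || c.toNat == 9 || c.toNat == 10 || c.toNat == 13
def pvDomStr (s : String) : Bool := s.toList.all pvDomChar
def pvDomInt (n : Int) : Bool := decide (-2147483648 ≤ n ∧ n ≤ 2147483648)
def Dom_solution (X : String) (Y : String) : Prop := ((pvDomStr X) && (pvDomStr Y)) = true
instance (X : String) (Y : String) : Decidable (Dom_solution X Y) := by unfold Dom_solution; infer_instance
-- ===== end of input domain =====

-- B replaces the set-intersection + comparison sort of A by a single counting sweep
-- over the char codes 126..9 (objective: faster, asymptotically no sort).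

-- ===== PORT A =====
def solution (X : String) (Y : String) : String :=
  let x_dic := PySem.Dict.counter X.toList
  let y_dic := PySem.Dict.counter Y.toList
  -- Python iterates set(X) & set(Y) in hash order; the result is sorted afterwards,
  -- so the port's insertion order is exact for the returned value.
  let res : List Char :=
    (PySem.Set.inter (PySem.Set.ofList X.toList) (PySem.Set.ofList Y.toList)).foldl
      (fun r k => r ++ List.replicate (min (x_dic.getD k 0) (y_dic.getD k 0)).toNat k) []
  let ans := PySem.List.sorted res (fun c => c) true
  if PySem.Set.equal (PySem.Set.ofList ans) (PySem.Set.ofList ['0']) then "0"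
  else if ans.length > 0 then String.ofList ans
  else "-1"

-- ===== PORT B =====
def solution_alt (X : String) (Y : String) : String :=
  let cx := PySem.Dict.counter X.toList
  let cy := PySem.Dict.counter Y.toList
  let ans : List Char :=
    (PySem.List.pyRange 126 8 (-1)).foldl
      (fun acc code =>
        let c := Char.ofNat code.toNat
        acc ++ List.replicate (min (cx.getD c 0) (cy.getD c 0)).toNat c) []
  if ans = [] then "-1"
  else if ans.count '0' = ans.length then "0"
  else String.ofList ans

-- ===== PRECONDITION & SPEC =====
def Spec_solution (X : String) (Y : String) (out : String) : Prop := out = solution_alt X Y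
instance (X : String) (Y : String) (out : String) : Decidable (Spec_solution X Y out) := by unfold Spec_solution; infer_instance

-- ===== CLAIM (what is proved, stated in full; the proofs are below) =====
def Claim_equal_solution : Prop := ∀ (X : String) (Y : String), Dom_solution X Y → Spec_solution X Y (solution X Y)

-- ===== LEMMAS AND PROOFS =====

-- the common multiset: min of the two multiplicities
def pvF (X Y : String) (c : Char) : Nat := min (X.toList.count c) (Y.toList.count c)

-- the descending list of candidate characters (codes 126..9)
def pvL : List Char := (PySem.List.pyRange 126 8 (-1)).map (fun i => Char.ofNat i.toNat)

theorem pvL_nodup : pvL.Nodup := by decide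

theorem pvL_desc : pvL.Pairwise (fun a b => b < a) := by decide

theorem mem_pvL {c : Char} (h : pvDomChar c = true) : c ∈ pvL := by
  have hb : 9 ≤ c.toNat ∧ c.toNat ≤ 126 := by
    simp only [pvDomChar, Bool.or_eq_true, Bool.and_eq_true, decide_eq_true_eq,
      beq_iff_eq] at h
    omega
  have : ((c.toNat : Int)) ∈ PySem.List.pyRange 126 8 (-1) := by
    rw [PySem.List.mem_pyRange_neg_one]
    omega
  refine List.mem_map.mpr ⟨(c.toNat : Int), this, ?_⟩
  simp [Int.toNat_natCast, Char.ofNat_toNat]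

theorem count_flatMap_rep (l : List Char) (f : Char → Nat) (c : Char) (hl : l.Nodup) :
    (l.flatMap (fun k => List.replicate (f k) k)).count c = if c ∈ l then f c else 0 := by
  induction l with
  | nil => simp
  | cons a t ih =>
    rcases List.nodup_cons.mp hl with ⟨ha, ht⟩
    simp only [List.flatMap_cons, List.count_append, List.count_replicate, ih ht,
      List.mem_cons]
    by_cases hca : c = a
    · subst hca
      simp [ha]
    · simp [hca, Ne.symm hca]

theorem pairwise_flatMap_rep (l : List Char) (f : Char → Nat)
    (hl : l.Pairwise (fun a b => b < a)) :
    (l.flatMap (fun k => List.replicate (f k) k)).Pairwise (fun a b : Char => b ≤ a) := by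
  induction l with
  | nil => simp
  | cons a t ih =>
    rcases List.pairwise_cons.mp hl with ⟨ha, ht⟩
    simp only [List.flatMap_cons]
    rw [List.pairwise_append]
    refine ⟨?_, ih ht, ?_⟩
    · exact List.pairwise_replicate.mpr (Or.inr le_rfl)
    · intro x hx y hy
      have hx' := List.eq_of_mem_replicate hx
      rcases List.mem_flatMap.mp hy with ⟨k, hk, hy'⟩
      have hy'' := List.eq_of_mem_replicate hy'
      subst hx'; subst hy''
      exact le_of_lt (ha _ hk)

theorem min_getD_counter (X Y : String) (c : Char) :
    (min ((PySem.Dict.counter X.toList).getD c 0)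
         ((PySem.Dict.counter Y.toList).getD c 0)).toNat = pvF X Y c := by
  rw [PySem.Dict.getD_counter, PySem.Dict.getD_counter]
  simp [pvF, ← Nat.cast_min]

theorem branches (l : List Char) :
    (if PySem.Set.equal (PySem.Set.ofList l) (PySem.Set.ofList ['0']) then "0"
     else if l.length > 0 then String.ofList l else "-1")
    = (if l = [] then "-1" else if l.count '0' = l.length then "0" else String.ofList l) := by
  rcases l with _ | ⟨c, t⟩
  · decide
  · rw [if_neg (by simp : ¬ (c :: t = []))]
    by_cases hall : ∀ b ∈ c :: t, '0' = b
    · have hcnt : (c :: t).count '0' = (c :: t).length := List.count_eq_length.mpr hall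
      have hequal : PySem.Set.equal (PySem.Set.ofList (c :: t)) (PySem.Set.ofList ['0']) = true := by
        rw [PySem.Set.equal_iff]
        intro x
        simp only [PySem.Set.mem_ofList, List.mem_singleton]
        constructor
        · intro hx; exact (hall x hx).symm
        · intro hx; subst hx
          have := (hall c List.mem_cons_self).symm
          subst this; exact List.mem_cons_self
      rw [if_pos hequal, if_pos hcnt]
    · have hcnt : ¬ (c :: t).count '0' = (c :: t).length := fun h => hall (List.count_eq_length.mp h)
      have hequal : ¬ PySem.Set.equal (PySem.Set.ofList (c :: t)) (PySem.Set.ofList ['0']) = true := by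
        intro h
        apply hall
        intro b hb
        have := (PySem.Set.equal_iff _ _).mp h b
        simp only [PySem.Set.mem_ofList, List.mem_singleton] at this
        exact (this.mp hb).symm
      rw [if_neg hequal, if_neg hcnt, if_pos (by simp)]

theorem main_eq (X Y : String) (h : Dom_solution X Y) : solution X Y = solution_alt X Y := by
  have hdX : ∀ c ∈ X.toList, pvDomChar c = true := by
    have := h
    simp only [Dom_solution, Bool.and_eq_true, pvDomStr, List.all_eq_true] at this
    exact this.1
  have hdY : ∀ c ∈ Y.toList, pvDomChar c = true := by
    simp only [Dom_solution, Bool.and_eq_true, pvDomStr, List.all_eq_true] at h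
    exact h.2
  unfold solution solution_alt
  simp only [min_getD_counter, PySem.List.foldl_append_eq_flatMap, List.nil_append]
  -- rewrite B's fold over codes as a flatMap over pvL
  have hB : (PySem.List.pyRange 126 8 (-1)).flatMap
      (fun code => List.replicate (pvF X Y (Char.ofNat code.toNat)) (Char.ofNat code.toNat))
      = pvL.flatMap (fun k => List.replicate (pvF X Y k) k) := by
    rw [pvL, List.flatMap_map]
  rw [hB]
  set S := PySem.Set.inter (PySem.Set.ofList X.toList) (PySem.Set.ofList Y.toList) with hS
  have hSnodup : S.Nodup := PySem.Set.nodup_inter _ _ (PySem.Set.nodup_ofList _)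
  have hmemS : ∀ c : Char, c ∈ S ↔ c ∈ X.toList ∧ c ∈ Y.toList := by
    intro c
    rw [hS, PySem.Set.mem_inter]
    simp [PySem.Set.mem_ofList]
  have hperm : (S.flatMap (fun k => List.replicate (pvF X Y k) k)).Perm
      (pvL.flatMap (fun k => List.replicate (pvF X Y k) k)) := by
    rw [List.perm_iff_count]
    intro c
    rw [count_flatMap_rep _ _ _ hSnodup, count_flatMap_rep _ _ _ pvL_nodup]
    by_cases hcS : c ∈ S
    · have hx := (hmemS c).mp hcS
      have hcL : c ∈ pvL := mem_pvL (hdX c hx.1)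
      simp [hcS, hcL]
    · have hz : pvF X Y c = 0 := by
        have := fun h' => hcS ((hmemS c).mpr h')
        rcases not_and_or.mp this with hx | hy
        · simp [pvF, List.count_eq_zero_of_not_mem hx]
        · simp [pvF, List.count_eq_zero_of_not_mem hy]
      simp [hcS, hz]
  have hsorted : PySem.List.sorted (S.flatMap (fun k => List.replicate (pvF X Y k) k))
      (fun c => c) true = pvL.flatMap (fun k => List.replicate (pvF X Y k) k) := by
    exact List.Perm.eq_of_pairwise (le := fun a b : Char => b ≤ a)
      (fun a b _ _ h1 h2 => le_antisymm h2 h1)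
      (PySem.List.sorted_pairwise_rev _ _)
      (pairwise_flatMap_rep _ _ pvL_desc)
      ((PySem.List.sorted_perm _ _ _).trans hperm)
  rw [hsorted]
  exact branches _

-- ===== VERDICT (by name: the statement is the Claim_ definition above) =====
theorem solution_spec : Claim_equal_solution := by
  intro X Y h
  unfold Spec_solution
  exact main_eq X Y h
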